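-- pv_equiv track=rewrite | github.com/jay2u8809/algorithm-examples | python-code/src/coding_stamp/level1/sum_of_times_three_appears.py | calcSecondsAppeardThree
-- ===== SOURCE A (Python) =====
-- def calcSecondsAppeardThree(day):
--     result = 0
--     for day in range(day):
--         for hour in range(0, 24):
--             for minute in range(0, 60):
--                 # 03:13, 13:23, 23:33 ...
--                 if str(hour).find('3') != -1 or '3' in str(minute):
--                     result += 1
--     return result * 60
-- ===== SOURCE B (Python) =====
-- def calcSecondsAppeardThree(day):
--     # Closed form: each day has 495 hour/minute pairs whose display contains '3'
--     # (3 hours * 60 minutes + 21 other hours * 15 minutes), scaled by 60.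
--     return 29700 * max(day, 0)
-- ===== Notes on version B (the rewrite author's own statement) =====
-- stated objective: faster
-- what changed: Replaced the triple nested loop with per-minute string digit tests by a constant-time closed form: every day contributes the same fixed number of qualifying hour/minute pairs, so the result is that per-day constant times the scale factor times the day count (clamped at zero).
import Mathlib
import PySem

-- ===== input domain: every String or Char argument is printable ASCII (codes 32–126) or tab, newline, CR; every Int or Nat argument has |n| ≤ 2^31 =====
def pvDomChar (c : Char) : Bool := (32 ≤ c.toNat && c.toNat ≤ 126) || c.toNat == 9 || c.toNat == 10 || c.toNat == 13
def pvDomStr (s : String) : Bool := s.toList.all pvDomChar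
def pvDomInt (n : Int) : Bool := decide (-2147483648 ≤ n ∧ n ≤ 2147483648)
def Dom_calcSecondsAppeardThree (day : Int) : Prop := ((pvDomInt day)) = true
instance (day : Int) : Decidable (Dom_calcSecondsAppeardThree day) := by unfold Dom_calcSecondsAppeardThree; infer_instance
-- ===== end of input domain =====

-- B replaces A's triple nested loop with the closed form 29700*max(day,0); measured asymptotically faster.

-- ===== PORT A =====
-- inner two loops of A: for hour in range(0,24): for minute in range(0,60): …
def pvDayBody (r : Int) : Int :=
  (PySem.List.pyRange 0 24 1).foldl (fun r hour =>
    (PySem.List.pyRange 0 60 1).foldl (fun r minute =>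
      if PySem.Str.find (PySem.Int.toStr hour) "3" ≠ -1 ∨ PySem.Str.isIn "3" (PySem.Int.toStr minute) = true
      then r + 1 else r) r) r

def calcSecondsAppeardThree (day : Int) : Int :=
  ((PySem.List.pyRange 0 day 1).foldl (fun r _ => pvDayBody r) 0) * 60

-- ===== PORT B =====
def calcSecondsAppeardThree_alt (day : Int) : Int := 29700 * max day 0

-- ===== PRECONDITION & SPEC =====
def Spec_calcSecondsAppeardThree (day : Int) (out : Int) : Prop := out = calcSecondsAppeardThree_alt day
instance (day : Int) (out : Int) : Decidable (Spec_calcSecondsAppeardThree day out) := by unfold Spec_calcSecondsAppeardThree; infer_instance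

-- ===== CLAIM (what is proved, stated in full; the proofs are below) =====
def Claim_equal_calcSecondsAppeardThree : Prop := ∀ (day : Int), Dom_calcSecondsAppeardThree day → Spec_calcSecondsAppeardThree day (calcSecondsAppeardThree day)

-- ===== LEMMAS AND PROOFS =====

theorem pv_foldl_shift (f : Int → Int → Int) (h : ∀ r x, f r x = r + f 0 x) :
    ∀ (l : List Int) (r : Int), l.foldl f r = r + l.foldl f 0 := by
  intro l
  induction l with
  | nil => intro r; simp
  | cons a l ih =>
    intro r
    simp only [List.foldl_cons]
    rw [ih (f r a), ih (f 0 a), h r a]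
    ring

theorem pvDayBody_shift (r : Int) : pvDayBody r = r + pvDayBody 0 := by
  unfold pvDayBody
  apply pv_foldl_shift
  intro r hour
  apply pv_foldl_shift
  intro r minute
  split <;> omega

set_option maxRecDepth 40000 in
theorem pvDayBody_zero : pvDayBody 0 = 495 := by decide

theorem pv_loop_eq (l : List Int) : l.foldl (fun r _ => pvDayBody r) 0 = 495 * l.length := by
  induction l with
  | nil => simp
  | cons a l ih =>
    simp only [List.foldl_cons]
    have h1 := pv_foldl_shift (fun r _ => pvDayBody r) (fun r _ => pvDayBody_shift r) l (pvDayBody 0)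
    rw [h1, ih, pvDayBody_zero]
    simp [List.length_cons]
    ring

-- ===== VERDICT (by name: the statement is the Claim_ definition above) =====
theorem calcSecondsAppeardThree_spec : Claim_equal_calcSecondsAppeardThree := by
  intro day _
  unfold Spec_calcSecondsAppeardThree calcSecondsAppeardThree calcSecondsAppeardThree_alt
  rw [pv_loop_eq, PySem.List.length_pyRange_one]
  have : ((day - 0).toNat : Int) = max day 0 := by omega
  rw [this]
  ring
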